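-- pv_equiv track=rewrite | github.com/shaunhegarty/letters-api | config/insertdictionary.py | get_hardest_word
-- ===== SOURCE A (Python) =====
-- Ladder = list[str]
--
-- def get_hardest_word(ladder: Ladder, word_scores: dict[str, int]) -> tuple[str, int]:
--     hardest_word_score: int = 0
--     hardest_word: str = ""
--     for word in ladder:
--         word_score = word_scores.get(word, 0)
--         if word_score > hardest_word_score:
--             hardest_word_score = word_score
--             hardest_word = word
--     return hardest_word, hardest_word_score
-- ===== SOURCE B (Python) =====
-- def get_hardest_word(ladder, word_scores):
--     ranked = sorted(((w, word_scores.get(w, 0)) for w in ladder),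
--                     key=lambda p: p[1], reverse=True)
--     if ranked and ranked[0][1] > 0:
--         return ranked[0]
--     return "", 0
-- ===== Notes on version B (the rewrite author's own statement) =====
-- stated objective: alternative
-- what changed: Replaces the running-max scan with a stable descending sort of all (word, score) pairs followed by one head inspection: stability makes the head the first word with maximal score, and the head's score>0 test yields ('', 0) exactly when no word has a positive score.
import Mathlib
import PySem

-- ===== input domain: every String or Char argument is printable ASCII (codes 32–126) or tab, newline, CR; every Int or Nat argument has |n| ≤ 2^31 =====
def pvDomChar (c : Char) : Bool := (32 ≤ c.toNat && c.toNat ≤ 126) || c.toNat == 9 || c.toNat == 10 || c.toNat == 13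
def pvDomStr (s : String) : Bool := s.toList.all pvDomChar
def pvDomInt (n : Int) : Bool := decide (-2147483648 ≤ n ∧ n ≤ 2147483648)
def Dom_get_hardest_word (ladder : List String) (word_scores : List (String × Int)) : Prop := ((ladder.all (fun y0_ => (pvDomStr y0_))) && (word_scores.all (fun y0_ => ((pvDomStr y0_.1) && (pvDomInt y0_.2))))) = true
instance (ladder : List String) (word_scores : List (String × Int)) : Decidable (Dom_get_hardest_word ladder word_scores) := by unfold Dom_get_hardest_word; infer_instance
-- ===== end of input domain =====

-- A: running-max scan, strict '>' keeps the first maximal positive word.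
-- B: stable descending sort of all (word, score) pairs, then one look at the head.
-- Alternative decomposition (sort-then-select instead of an online scan); equivalence proved on all inputs.

-- ===== PORT A =====
def get_hardest_word (ladder : List String) (word_scores : List (String × Int)) : String × Int :=
  -- state = (hardest_word, hardest_word_score), initialised ("", 0); the loop body is A's 'if'
  ladder.foldl
    (fun st word =>
      let word_score := PySem.Dict.getD (PySem.Dict.mk word_scores) word 0
      if word_score > st.2 then (word, word_score) else st)
    ("", 0)

-- ===== PORT B =====
def get_hardest_word_alt (ladder : List String) (word_scores : List (String × Int)) : String × Int :=
  -- ranked = sorted(((w, word_scores.get(w, 0)) for w in ladder), key=lambda p: p[1], reverse=True)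
  let ranked :=
    PySem.List.sorted
      (ladder.map (fun w => (w, PySem.Dict.getD (PySem.Dict.mk word_scores) w 0)))
      (fun p => p.2) true
  -- if ranked and ranked[0][1] > 0: return ranked[0]   /  return "", 0
  match ranked with
  | [] => ("", 0)
  | p :: _ => if p.2 > 0 then p else ("", 0)

-- ===== PRECONDITION & SPEC =====
def Spec_get_hardest_word (ladder : List String) (word_scores : List (String × Int)) (out : String × Int) : Prop := out = get_hardest_word_alt ladder word_scores
instance (ladder : List String) (word_scores : List (String × Int)) (out : String × Int) : Decidable (Spec_get_hardest_word ladder word_scores out) := by unfold Spec_get_hardest_word; infer_instance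

-- ===== CLAIM =====
def Claim_equal_get_hardest_word : Prop := ∀ (ladder : List String) (word_scores : List (String × Int)), Dom_get_hardest_word ladder word_scores → Spec_get_hardest_word ladder word_scores (get_hardest_word ladder word_scores)

-- ===== LEMMAS AND PROOFS =====

-- A's loop body, on a prebuilt (word, score) pair
def pvAStep (st p : String × Int) : String × Int := if st.2 < p.2 then p else st

-- A's fold over the ladder is pvAStep folded over the scored pairs
theorem ghw_foldA_eq (ladder : List String) (word_scores : List (String × Int)) :
    get_hardest_word ladder word_scores =
    (ladder.map (fun w => (w, PySem.Dict.getD (PySem.Dict.mk word_scores) w 0))).foldl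
      pvAStep ("", 0) := by
  unfold get_hardest_word
  rw [List.foldl_map]
  rfl

-- first-tie max combination is associative
theorem pvAStep_assoc (s x p : String × Int) :
    pvAStep (pvAStep s x) p = pvAStep s (pvAStep x p) := by
  unfold pvAStep
  split_ifs <;> first | rfl | (exfalso; omega)

-- combining a start state s with the fold of (x :: t): s survives iff its score is
-- strictly below the running max of (x :: t), which is the first maximal element
theorem pvAStep_fold_comm (t : List (String × Int)) :
    ∀ s x : String × Int,
      t.foldl pvAStep (pvAStep s x) =
      if s.2 < (t.foldl pvAStep x).2 then t.foldl pvAStep x else s := by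
  induction t with
  | nil =>
    intro s x
    simp only [List.foldl_nil]
    rfl
  | cons p r ih =>
    intro s x
    rw [List.foldl_cons, List.foldl_cons, pvAStep_assoc, ih s (pvAStep x p)]

-- head of an insertBy step depends only on the old head
theorem head?_insertBy {α : Type} (before : α → α → Bool) (x : α) (acc : List α) :
    (PySem.List.insertBy before x acc).head? =
    some (match acc.head? with
          | none => x
          | some y => if before x y then x else y) := by
  cases acc with
  | nil => rfl
  | cons y ys =>
    unfold PySem.List.insertBy
    by_cases h : before x y
    · simp [h]
    · simp [h]

-- head of the insertion-sort fold is the pvAStep running max (over an Option accumulator)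
theorem head?_sorted_fold (xs : List (String × Int)) :
    ∀ acc : List (String × Int),
      (xs.foldl (fun a x => PySem.List.insertBy (fun a b => decide (b.2 < a.2)) x a) acc).head? =
      xs.foldl (fun h x =>
          some (match h with
                | none => x
                | some y => pvAStep y x)) acc.head? := by
  induction xs with
  | nil => intro acc; rfl
  | cons p r ih =>
    intro acc
    rw [List.foldl_cons, List.foldl_cons, ih, head?_insertBy]
    congr 1
    cases acc.head? with
    | none => rfl
    | some y =>
      simp only [pvAStep]
      by_cases h : y.2 < p.2 <;> simp [h]

-- the Option running max from a some-state is A's fold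
theorem option_fold_some (xs : List (String × Int)) :
    ∀ s : String × Int,
      xs.foldl (fun h x =>
          some (match h with
                | none => x
                | some y => pvAStep y x)) (some s) =
      some (xs.foldl pvAStep s) := by
  induction xs with
  | nil => intro s; rfl
  | cons p r ih => intro s; rw [List.foldl_cons, List.foldl_cons]; exact ih (pvAStep s p)

-- A's fold equals B's sort-then-select, for any scored pair list
theorem ghw_main (scored : List (String × Int)) :
    scored.foldl pvAStep ("", 0) =
    (match PySem.List.sorted scored (fun p => p.2) true with
     | [] => (("" : String), (0 : Int))
     | p :: _ => if p.2 > 0 then p else ("", 0)) := by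
  cases scored with
  | nil => rfl
  | cons q t =>
    have hsorted : PySem.List.sorted (q :: t) (fun p : String × Int => p.2) true =
        (q :: t).foldl (fun a x => PySem.List.insertBy (fun a b => decide (b.2 < a.2)) x a) [] := rfl
    have hhead : (PySem.List.sorted (q :: t) (fun p : String × Int => p.2) true).head? =
        some (t.foldl pvAStep q) := by
      rw [hsorted, head?_sorted_fold (q :: t) []]
      exact option_fold_some t q
    cases hrk : PySem.List.sorted (q :: t) (fun p : String × Int => p.2) true with
    | nil => rw [hrk] at hhead; simp at hhead
    | cons m rest =>
      rw [hrk] at hhead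
      simp only [List.head?_cons, Option.some.injEq] at hhead
      rw [List.foldl_cons]
      rw [pvAStep_fold_comm t ("", 0) q, ← hhead]

-- ===== VERDICT =====
theorem get_hardest_word_spec : Claim_equal_get_hardest_word := by
  intro ladder word_scores _
  unfold Spec_get_hardest_word
  simp only [get_hardest_word_alt]
  rw [ghw_foldA_eq]
  exact ghw_main _
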